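-- pv_equiv track=rewrite | github.com/lzyqwr/astrbot_plugin_mc_log_analysis | main.py | _compose_lines_with_gaps
-- ===== SOURCE A (Python) =====
-- def _compose_lines_with_gaps(lines: list[str], indexes: list[int]) -> str:
--     if not indexes:
--         return ""
--     result = []
--     prev = -2
--     for idx in indexes:
--         if idx < 0 or idx >= len(lines):
--             continue
--         if idx != prev + 1:
--             result.append("...[中间内容已省略]...")
--         result.append(lines[idx])
--         prev = idx
--     return "\n".join(result).strip()
-- ===== SOURCE B (Python) =====
-- def _compose_lines_with_gaps(lines: list[str], indexes: list[int]) -> str: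
--     n = len(lines)
--     valid = [i for i in indexes if 0 <= i < n]
--     # partition the valid indices into maximal runs of consecutive values
--     runs = []
--     cur = []
--     for i in valid:
--         if cur and i == cur[-1] + 1:
--             cur.append(i)
--         else:
--             if cur:
--                 runs.append(cur)
--             cur = [i]
--     if cur:
--         runs.append(cur)
--     # a gap marker opens every run (also the first one)
--     pieces = []
--     for run in runs:
--         pieces.append("...[中间内容已省略]...")
--         pieces.extend(lines[i] for i in run)
--     return "\n".join(pieces).strip()
-- ===== Notes on version B (the rewrite author's own statement) =====
-- stated objective: alternative
-- what changed: A interleaves filtering, gap detection and output in one pass with a prev=-2 sentinel; B is a three-phase pipeline: filter valid indices, partition them into maximal consecutive runs, then emit a marker plus the lines per run.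
import Mathlib
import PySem

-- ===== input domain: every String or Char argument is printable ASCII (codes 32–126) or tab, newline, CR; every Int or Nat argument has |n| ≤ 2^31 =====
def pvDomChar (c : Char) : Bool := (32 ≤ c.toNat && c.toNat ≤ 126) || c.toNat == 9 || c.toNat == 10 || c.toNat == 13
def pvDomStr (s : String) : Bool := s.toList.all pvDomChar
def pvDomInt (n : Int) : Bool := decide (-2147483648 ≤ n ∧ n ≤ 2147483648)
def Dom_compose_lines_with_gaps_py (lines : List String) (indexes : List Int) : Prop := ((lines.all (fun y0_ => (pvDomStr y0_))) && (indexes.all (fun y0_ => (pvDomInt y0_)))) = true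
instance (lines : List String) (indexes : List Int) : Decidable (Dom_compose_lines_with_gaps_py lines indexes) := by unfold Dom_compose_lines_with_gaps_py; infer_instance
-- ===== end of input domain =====

-- B is the same task as a three-phase pipeline (filter → runs → emit) instead of A's
-- single pass with a prev sentinel; same cost, alternative decomposition.

def pvMarker : String := "...[中间内容已省略]..."

-- lines[idx]; exact here: both ports evaluate it only for 0 ≤ idx < len(lines)
def pvGet (lines : List String) (i : Int) : String := (PySem.List.pyGet? lines i).getD ""

-- ===== PORT A =====
def composeStepA (lines : List String) (st : List String × Int) (idx : Int) : List String × Int :=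
  if idx < 0 ∨ (lines.length : Int) ≤ idx then st
  else if idx ≠ st.2 + 1 then (st.1 ++ [pvMarker, pvGet lines idx], idx)
  else (st.1 ++ [pvGet lines idx], idx)

def compose_lines_with_gaps_py (lines : List String) (indexes : List Int) : String :=
  if indexes = [] then ""
  else
    let st := indexes.foldl (composeStepA lines) ([], -2)
    PySem.Str.strip (PySem.Str.join "\n" st.1)

-- ===== PORT B =====
-- the run-building loop: state = (finished runs, current run)
def composeStepB (st : List (List Int) × List Int) (i : Int) : List (List Int) × List Int :=
  match st.2.getLast? with
  | some l => if i = l + 1 then (st.1, st.2 ++ [i]) else (st.1 ++ [st.2], [i])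
  | none => (st.1, [i])

def pvFinalize (st : List (List Int) × List Int) : List (List Int) :=
  if st.2 = [] then st.1 else st.1 ++ [st.2]

def pvFlat (lines : List String) (runs : List (List Int)) : List String :=
  runs.flatMap (fun r => pvMarker :: r.map (pvGet lines))

def compose_lines_with_gaps_py_alt (lines : List String) (indexes : List Int) : String :=
  let valid := indexes.filter (fun i => decide (0 ≤ i) && decide (i < (lines.length : Int)))
  let runs := pvFinalize (valid.foldl composeStepB ([], []))
  PySem.Str.strip (PySem.Str.join "\n" (pvFlat lines runs))

-- ===== PRECONDITION & SPEC =====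
def Spec_compose_lines_with_gaps_py (lines : List String) (indexes : List Int) (out : String) : Prop := out = compose_lines_with_gaps_py_alt lines indexes
instance (lines : List String) (indexes : List Int) (out : String) : Decidable (Spec_compose_lines_with_gaps_py lines indexes out) := by unfold Spec_compose_lines_with_gaps_py; infer_instance

-- ===== CLAIM (what is proved, stated in full; the proofs are below) =====
def Claim_equal_compose_lines_with_gaps_py : Prop := ∀ (lines : List String) (indexes : List Int), Dom_compose_lines_with_gaps_py lines indexes → Spec_compose_lines_with_gaps_py lines indexes (compose_lines_with_gaps_py lines indexes)

-- ===== LEMMAS AND PROOFS =====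

-- A's loop ignores out-of-range indices, so folding over indexes = folding over the filtered list
lemma foldA_filter (lines : List String) : ∀ (xs : List Int) (st : List String × Int),
    xs.foldl (composeStepA lines) st
      = (xs.filter (fun i => decide (0 ≤ i) && decide (i < (lines.length : Int)))).foldl (composeStepA lines) st := by
  intro xs
  induction xs with
  | nil => intro st; rfl
  | cons x xs ih =>
    intro st
    by_cases hx : (0 ≤ x ∧ x < (lines.length : Int))
    · have : (fun i => decide (0 ≤ i) && decide (i < (lines.length : Int))) x = true := by
        simp [hx.1, hx.2]
      simp [this, List.foldl_cons, ih]
    · have hskip : composeStepA lines st x = st := by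
        unfold composeStepA
        have : x < 0 ∨ (lines.length : Int) ≤ x := by omega
        simp [this]
      have : (fun i => decide (0 ≤ i) && decide (i < (lines.length : Int))) x = false := by
        simp only [Bool.and_eq_false_iff, decide_eq_false_iff_not]
        omega
      simp [this, List.foldl_cons, hskip, ih]

-- invariant relating A's (result, prev) state to B's (runs, cur) state
def pvInv (lines : List String) (res : List String) (prev : Int)
    (runs : List (List Int)) (cur : List Int) : Prop :=
  (cur = [] ∧ runs = [] ∧ res = [] ∧ prev = -2) ∨
  (cur.getLast? = some prev ∧ res = pvFlat lines runs ++ pvMarker :: cur.map (pvGet lines))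

lemma pvFlat_append (lines : List String) (rs : List (List Int)) (r : List Int) :
    pvFlat lines (rs ++ [r]) = pvFlat lines rs ++ pvMarker :: r.map (pvGet lines) := by
  simp [pvFlat]

lemma main_inv (lines : List String) : ∀ (xs : List Int) (res : List String) (prev : Int)
    (runs : List (List Int)) (cur : List Int),
    (∀ x ∈ xs, 0 ≤ x ∧ x < (lines.length : Int)) →
    pvInv lines res prev runs cur →
    (xs.foldl (composeStepA lines) (res, prev)).1
      = pvFlat lines (pvFinalize (xs.foldl composeStepB (runs, cur))) := by
  intro xs
  induction xs with
  | nil =>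
    intro res prev runs cur _ hinv
    rcases hinv with ⟨hc, hr, hres, _⟩ | ⟨hlast, hres⟩
    · simp [hc, hr, hres, pvFinalize, pvFlat]
    · have hc : cur ≠ [] := by
        intro h; rw [h] at hlast; simp at hlast
      simp [pvFinalize, hc, pvFlat_append, hres]
  | cons x xs ih =>
    intro res prev runs cur hall hinv
    have hx := hall x (by simp)
    have hall' : ∀ y ∈ xs, 0 ≤ y ∧ y < (lines.length : Int) := fun y hy => hall y (by simp [hy])
    simp only [List.foldl_cons]
    rcases hinv with ⟨hc, hr, hres, hprev⟩ | ⟨hlast, hres⟩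
    · -- initial state: x ≥ 0 ≠ prev+1 = -1, B starts the first run
      have hA : composeStepA lines (res, prev) x = (res ++ [pvMarker, pvGet lines x], x) := by
        unfold composeStepA
        have h1 : ¬ (x < 0 ∨ (lines.length : Int) ≤ x) := by omega
        have h2 : x ≠ prev + 1 := by omega
        simp [h1, h2]
      have hB : composeStepB (runs, cur) x = (runs, [x]) := by
        unfold composeStepB; simp [hc]
      rw [hA, hB]
      exact ih _ _ _ _ hall' (Or.inr (by simp [hres, hr, pvFlat]))
    · have hc : cur ≠ [] := by intro h; rw [h] at hlast; simp at hlast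
      by_cases hcons : x = prev + 1
      · -- continue the current run
        have hA : composeStepA lines (res, prev) x = (res ++ [pvGet lines x], x) := by
          unfold composeStepA
          have h1 : ¬ (x < 0 ∨ (lines.length : Int) ≤ x) := by omega
          simp [hcons]
          omega
        have hB : composeStepB (runs, cur) x = (runs, cur ++ [x]) := by
          unfold composeStepB; simp [hlast, hcons]
        rw [hA, hB]
        refine ih _ _ _ _ hall' (Or.inr ⟨by simp, ?_⟩)
        simp [hres, List.map_append]
      · -- close the current run, open a new one with a marker
        have hA : composeStepA lines (res, prev) x = (res ++ [pvMarker, pvGet lines x], x) := by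
          unfold composeStepA
          have h1 : ¬ (x < 0 ∨ (lines.length : Int) ≤ x) := by omega
          simp [h1, hcons]
        have hB : composeStepB (runs, cur) x = (runs ++ [cur], [x]) := by
          unfold composeStepB; simp [hlast, hcons]
        rw [hA, hB]
        refine ih _ _ _ _ hall' (Or.inr ⟨by simp, ?_⟩)
        simp [hres, pvFlat_append]

lemma mem_filter_bounds (lines : List String) (indexes : List Int) :
    ∀ x ∈ indexes.filter (fun i => decide (0 ≤ i) && decide (i < (lines.length : Int))),
      0 ≤ x ∧ x < (lines.length : Int) := by
  intro x hx
  have := List.of_mem_filter hx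
  simpa using this

-- ===== VERDICT (by name: the statement is the Claim_ definition above) =====
theorem compose_lines_with_gaps_py_spec : Claim_equal_compose_lines_with_gaps_py := by
  intro lines indexes _
  unfold Spec_compose_lines_with_gaps_py compose_lines_with_gaps_py compose_lines_with_gaps_py_alt
  by_cases hempty : indexes = []
  · subst hempty
    simp [pvFinalize, pvFlat]
    decide
  · simp only [hempty, if_false]
    rw [foldA_filter]
    rw [main_inv lines _ _ _ _ _ (mem_filter_bounds lines indexes) (Or.inl ⟨rfl, rfl, rfl, rfl⟩)]
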